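-- pv_equiv track=rewrite | github.com/sandeepgoudmacha/InterviewPracticePartner | backend/utils/off_topic_detector.py | _answer_relates_to_question
-- ===== SOURCE A (Python) =====
-- def _answer_relates_to_question(answer: str, question: str) -> bool:
--     """Check if answer has common words with question (simple relevance check)."""
--     # Extract important words (ignore common words)
--     stop_words = {'the', 'a', 'an', 'is', 'are', 'was', 'were', 'be', 'do', 'does', 'did'}
--
--     question_words = set(word for word in question.split()
--                        if len(word) > 3 and word.lower() not in stop_words)
--     answer_words = set(word for word in answer.split()
--                      if len(word) > 3 and word.lower() not in stop_words)
--
--     # Check for word overlap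
--     overlap = question_words & answer_words
--     return len(overlap) >= 1 or len(question_words) == 0  # Allow if no specific words in Q
-- ===== SOURCE B (Python) =====
-- def _answer_relates_to_question(answer: str, question: str) -> bool:
--     """Check if answer has common words with question (simple relevance check)."""
--     stop_words = {'the', 'a', 'an', 'is', 'are', 'was', 'were', 'be', 'do', 'does', 'did'}
--
--     def significant_sorted(text):
--         return sorted({w for w in text.split()
--                        if len(w) > 3 and w.lower() not in stop_words})
--
--     q = significant_sorted(question)
--     if not q:
--         return True  # no specific words in the question
--     a = significant_sorted(answer)
--     # merge-style two-pointer scan of the two sorted word lists for a common word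
--     i = j = 0
--     while i < len(q) and j < len(a):
--         if q[i] == a[j]:
--             return True
--         if q[i] < a[j]:
--             i += 1
--         else:
--             j += 1
--     return False
-- ===== Notes on version B (the rewrite author's own statement) =====
-- stated objective: alternative
-- what changed: Replaces the hash-set intersection by a sort-based algorithm: each side's significant words are deduplicated and sorted, and a two-pointer merge scan over the two sorted lists detects a common word (early exit), with an immediate True when the question's list is empty.
import Mathlib
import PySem

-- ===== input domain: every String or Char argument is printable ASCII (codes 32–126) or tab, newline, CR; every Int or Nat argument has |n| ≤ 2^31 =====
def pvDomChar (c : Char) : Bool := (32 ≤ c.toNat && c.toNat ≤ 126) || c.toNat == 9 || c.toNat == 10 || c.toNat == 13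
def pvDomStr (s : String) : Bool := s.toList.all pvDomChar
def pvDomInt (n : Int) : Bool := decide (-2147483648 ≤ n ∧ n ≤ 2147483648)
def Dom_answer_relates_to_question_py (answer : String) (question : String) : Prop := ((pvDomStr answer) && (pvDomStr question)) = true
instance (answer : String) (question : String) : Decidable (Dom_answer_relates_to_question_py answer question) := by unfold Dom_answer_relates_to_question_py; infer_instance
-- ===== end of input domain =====

-- A = the original hash-set-intersection relevance check; B = a sort-based alternative
-- (dedup+sort both significant-word lists, two-pointer merge scan); return value proved equal.

-- ===== PORT A =====
def pvStopWordsA : PySem.Set String :=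
  PySem.Set.ofList ["the", "a", "an", "is", "are", "was", "were", "be", "do", "does", "did"]

-- the generator predicate of A's two set comprehensions: len(word) > 3 and word.lower() not in stop_words
def pvKeepA (word : String) : Bool :=
  decide (PySem.Str.len word > 3) && !(PySem.Set.contains pvStopWordsA (PySem.Str.lower word))

def answer_relates_to_question_py (answer : String) (question : String) : Bool :=
  let question_words : PySem.Set String :=
    PySem.Set.ofList ((PySem.Str.split₀ question).filter pvKeepA)
  let answer_words : PySem.Set String :=
    PySem.Set.ofList ((PySem.Str.split₀ answer).filter pvKeepA)
  let overlap := PySem.Set.inter question_words answer_words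
  decide (PySem.Set.len overlap ≥ 1) || decide (PySem.Set.len question_words = 0)

-- ===== PORT B =====
def pvSigB (word : String) : Bool :=
  decide (PySem.Str.len word > 3) &&
    !(PySem.Set.contains (PySem.Set.ofList ["the", "a", "an", "is", "are", "was", "were", "be", "do", "does", "did"]) (PySem.Str.lower word))

-- significant_sorted(text) = sorted({w for w in text.split() if ...})
def pvSortedSig (text : String) : List String :=
  PySem.List.sorted (PySem.Set.ofList ((PySem.Str.split₀ text).filter pvSigB)) (fun x => x) false

-- the while loop with two indices i, j: a two-pointer merge scan over the sorted lists
def pvScan (xs ys : List String) : Bool :=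
  match xs, ys with
  | [], _ => false
  | _ :: _, [] => false
  | x :: xs', y :: ys' =>
    if x == y then true
    else if x < y then pvScan xs' (y :: ys')
    else pvScan (x :: xs') ys'
termination_by xs.length + ys.length

def answer_relates_to_question_py_alt (answer : String) (question : String) : Bool :=
  let q := pvSortedSig question
  if q.isEmpty then
    true
  else
    pvScan q (pvSortedSig answer)

-- ===== PRECONDITION & SPEC =====
def Spec_answer_relates_to_question_py (answer : String) (question : String) (out : Bool) : Prop := out = answer_relates_to_question_py_alt answer question
instance (answer : String) (question : String) (out : Bool) : Decidable (Spec_answer_relates_to_question_py answer question out) := by unfold Spec_answer_relates_to_question_py; infer_instance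

-- ===== CLAIM (what is proved, stated in full; the proofs are below) =====
def Claim_equal_answer_relates_to_question_py : Prop := ∀ (answer : String) (question : String), Dom_answer_relates_to_question_py answer question → Spec_answer_relates_to_question_py answer question (answer_relates_to_question_py answer question)

-- ===== LEMMAS AND PROOFS =====

lemma pvKeep_eq : pvKeepA = pvSigB := by
  funext w; rfl

-- the merge scan on strictly increasing lists decides existence of a common element
lemma pvScan_iff (xs ys : List String) (hx : xs.Pairwise (· < ·)) (hy : ys.Pairwise (· < ·)) :
    pvScan xs ys = true ↔ ∃ w, w ∈ xs ∧ w ∈ ys := by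
  fun_induction pvScan xs ys with
  | case1 ys => simp
  | case2 x xs' => simp
  | case3 x xs' y ys' heq =>
    have hxy : x = y := by simpa using heq
    exact iff_of_true rfl ⟨x, List.mem_cons_self, by simp [hxy]⟩
  | case4 x xs' y ys' hne hlt ih =>
    rw [ih hx.of_cons hy]
    constructor
    · rintro ⟨w, hw1, hw2⟩; exact ⟨w, List.mem_cons_of_mem _ hw1, hw2⟩
    · rintro ⟨w, hw1, hw2⟩
      rcases List.mem_cons.mp hw1 with h1 | hw1'
      · -- w = x is in y :: ys' but every element there is ≥ y > x
        exfalso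
        rcases List.mem_cons.mp hw2 with h2 | hw2'
        · exact hne (beq_iff_eq.mpr (h1.symm.trans h2))
        · have hlt2 := (List.pairwise_cons.mp hy).1 w hw2'
          rw [h1] at hlt2
          exact absurd (lt_trans hlt hlt2) (lt_irrefl x)
      · exact ⟨w, hw1', hw2⟩
  | case5 x xs' y ys' hne hlt ih =>
    rw [ih hx hy.of_cons]
    constructor
    · rintro ⟨w, hw1, hw2⟩; exact ⟨w, hw1, List.mem_cons_of_mem _ hw2⟩
    · rintro ⟨w, hw1, hw2⟩
      rcases List.mem_cons.mp hw2 with h2 | hw2'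
      · exfalso
        rcases List.mem_cons.mp hw1 with h1 | hw1'
        · exact hne (beq_iff_eq.mpr (h1.symm.trans h2))
        · have hxw := (List.pairwise_cons.mp hx).1 w hw1'
          rw [h2] at hxw
          exact hlt hxw
      · exact ⟨w, hw1, hw2'⟩

-- core list-level fact: A's intersection test equals B's sort-and-merge-scan on the filtered token lists
lemma pv_core (qf af : List String) :
    (decide (PySem.Set.len (PySem.Set.inter (PySem.Set.ofList qf) (PySem.Set.ofList af)) ≥ 1) ||
      decide (PySem.Set.len (PySem.Set.ofList qf) = 0))
    = (if (PySem.List.sorted (PySem.Set.ofList qf) (fun x => x) false).isEmpty then true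
       else pvScan (PySem.List.sorted (PySem.Set.ofList qf) (fun x => x) false)
                   (PySem.List.sorted (PySem.Set.ofList af) (fun x => x) false)) := by
  have hqnil : (PySem.List.sorted (PySem.Set.ofList qf) (fun x => x) false) = [] ↔ qf = [] := by
    rw [PySem.List.sorted_eq_nil_iff]
    constructor
    · intro h
      rcases qf with _ | ⟨x, xs⟩
      · rfl
      · exfalso
        have : x ∈ PySem.Set.ofList (x :: xs) := by
          rw [PySem.Set.mem_ofList]; exact List.mem_cons_self
        simp [h] at this
    · rintro rfl; rfl
  rcases qf with _ | ⟨x, xs⟩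
  · simp [PySem.Set.ofList, PySem.Set.inter, PySem.Set.len, PySem.List.sorted]
  · have hne : ¬ (PySem.List.sorted (PySem.Set.ofList (x :: xs)) (fun x => x) false).isEmpty := by
      rw [List.isEmpty_iff]; intro h; exact (List.cons_ne_nil x xs) (hqnil.mp h)
    rw [if_neg hne]
    have hlen0 : decide (PySem.Set.len (PySem.Set.ofList (x :: xs)) = 0) = false := by
      simp only [PySem.Set.len_eq, decide_eq_false_iff_not]
      intro h
      have h0 : (PySem.Set.ofList (x :: xs)).length = 0 := by exact_mod_cast h
      have hx : x ∈ PySem.Set.ofList (x :: xs) := by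
        rw [PySem.Set.mem_ofList]; exact List.mem_cons_self
      rw [List.length_eq_zero_iff.mp h0] at hx
      simp at hx
    rw [hlen0, Bool.or_false]
    rw [Bool.eq_iff_iff, decide_eq_true_iff,
      pvScan_iff _ _ (PySem.List.sorted_ofList_pairwise_lt _) (PySem.List.sorted_ofList_pairwise_lt _)]
    constructor
    · intro h
      have hpos : 0 < (PySem.Set.inter (PySem.Set.ofList (x :: xs)) (PySem.Set.ofList af)).length := by
        rw [PySem.Set.len_eq] at h; omega
      obtain ⟨w, hw⟩ := List.exists_mem_of_length_pos hpos
      rw [PySem.Set.mem_inter] at hw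
      exact ⟨w, by rw [PySem.List.mem_sorted]; exact hw.1, by rw [PySem.List.mem_sorted]; exact hw.2⟩
    · rintro ⟨w, hw1, hw2⟩
      rw [PySem.List.mem_sorted] at hw1 hw2
      have : w ∈ PySem.Set.inter (PySem.Set.ofList (x :: xs)) (PySem.Set.ofList af) := by
        rw [PySem.Set.mem_inter]; exact ⟨hw1, hw2⟩
      have := List.length_pos_of_mem this
      rw [PySem.Set.len_eq]; omega

-- ===== VERDICT (by name: the statement is the Claim_ definition above) =====
theorem answer_relates_to_question_py_spec : Claim_equal_answer_relates_to_question_py := by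
  intro answer question _
  unfold Spec_answer_relates_to_question_py
  unfold answer_relates_to_question_py answer_relates_to_question_py_alt pvSortedSig
  rw [pvKeep_eq]
  exact pv_core _ _
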